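-- pv_equiv track=rewrite | github.com/hjongc/Helios | helios/rules.py | drop_hints_and_normalize
-- ===== SOURCE A (Python) =====
-- from typing import List, Optional, Tuple
--
-- def drop_hints_and_normalize(stmt: str) -> str:
--     """
--     Remove Oracle hints like /*+ parallel(...) */ safely.
--
--     한국어 주석: 오라클 힌트는 제거합니다.
--     """
--     out: List[str] = []
--     i = 0
--     while i < len(stmt):
--         if stmt[i : i + 3] == "/*+":
--             end = stmt.find("*/", i + 3)
--             if end == -1:
--                 break
--             i = end + 2
--             continue
--         out.append(stmt[i])
--         i += 1
--     return "".join(out)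
-- ===== SOURCE B (Python) =====
-- def drop_hints_and_normalize(stmt: str) -> str:
--     parts = []
--     pos = 0
--     while True:
--         idx = stmt.find("/*+", pos)
--         if idx == -1:
--             parts.append(stmt[pos:])
--             break
--         parts.append(stmt[pos:idx])
--         end = stmt.find("*/", idx + 3)
--         if end == -1:
--             break
--         pos = end + 2
--     return "".join(parts)
-- ===== Notes on version B (the rewrite author's own statement) =====
-- stated objective: idiomatic
-- what changed: B replaces A's per-character index loop with a chunk-emitting scan: str.find locates each '/*+' and its closing '*/', and whole slices between hints are appended instead of single characters.
import Mathlib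
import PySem

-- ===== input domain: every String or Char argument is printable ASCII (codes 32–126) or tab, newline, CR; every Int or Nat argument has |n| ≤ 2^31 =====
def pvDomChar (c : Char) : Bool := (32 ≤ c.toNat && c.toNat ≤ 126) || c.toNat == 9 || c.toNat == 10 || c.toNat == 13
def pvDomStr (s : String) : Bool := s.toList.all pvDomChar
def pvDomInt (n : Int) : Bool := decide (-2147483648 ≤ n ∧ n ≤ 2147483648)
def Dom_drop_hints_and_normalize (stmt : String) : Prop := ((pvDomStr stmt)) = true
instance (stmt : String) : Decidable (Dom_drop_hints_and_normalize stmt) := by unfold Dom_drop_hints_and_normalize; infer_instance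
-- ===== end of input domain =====

-- B replaces A's per-character index loop with a chunk-emitting scan over find results (idiomatic; return value only).

-- ===== PORT A =====

-- str.find("*/", ...) restricted to the remaining suffix: offset of the first "*/" occurrence, none = -1
def pvFindClose : List Char → Option Nat
  | [] => none
  | c :: rest =>
    if (c :: rest).take 2 = ['*', '/'] then some 0
    else (pvFindClose rest).map (· + 1)

-- A's while loop: per-character scan; on "/*+" skip to past the matching "*/", break if none
def pvALoop (cs : List Char) : List Char :=
  match cs with
  | [] => []
  | c :: rest =>
    if (c :: rest).take 3 = ['/', '*', '+'] then
      match pvFindClose ((c :: rest).drop 3) with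
      | none => []
      | some e => pvALoop ((c :: rest).drop (3 + e + 2))
    else c :: pvALoop rest
termination_by cs.length
decreasing_by
  · simp [List.length_drop]
  · simp

def drop_hints_and_normalize (stmt : String) : String :=
  String.ofList (pvALoop stmt.toList)

-- ===== PORT B =====

-- str.find("/*+", pos) restricted to the suffix starting at pos: offset of the first "/*+", none = -1
def pvFindHint : List Char → Option Nat
  | [] => none
  | c :: rest =>
    if (c :: rest).take 3 = ['/', '*', '+'] then some 0
    else (pvFindHint rest).map (· + 1)

-- needed by pvBLoop's termination: a hint found at offset k leaves at least 3 chars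
theorem pvFindHint_le : ∀ cs k, pvFindHint cs = some k → k + 3 ≤ cs.length := by
  intro cs
  induction cs with
  | nil => intro k h; simp [pvFindHint] at h
  | cons c rest ih =>
    intro k h
    simp only [pvFindHint] at h
    split at h
    · rename_i hp
      cases h
      have : ((c :: rest).take 3).length = 3 := by rw [hp]; rfl
      simp [List.length_take] at this
      simp only [List.length_cons]
      omega
    · rcases Option.map_eq_some_iff.mp h with ⟨j, hj, rfl⟩
      have := ih j hj
      simp only [List.length_cons]; omega

-- B's while True loop: emit the chunk before each hint, skip past its close, stop when no hint or no close
def pvBLoop (cs : List Char) : List Char :=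
  match hf : pvFindHint cs with
  | none => cs
  | some k =>
    match pvFindClose (cs.drop (k + 3)) with
    | none => cs.take k
    | some e => cs.take k ++ pvBLoop (cs.drop (k + 3 + e + 2))
termination_by cs.length
decreasing_by
  have := pvFindHint_le cs k hf
  simp [List.length_drop]; omega

def drop_hints_and_normalize_alt (stmt : String) : String :=
  String.ofList (pvBLoop stmt.toList)

-- ===== PRECONDITION & SPEC =====
def Spec_drop_hints_and_normalize (stmt : String) (out : String) : Prop := out = drop_hints_and_normalize_alt stmt
instance (stmt : String) (out : String) : Decidable (Spec_drop_hints_and_normalize stmt out) := by unfold Spec_drop_hints_and_normalize; infer_instance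

-- ===== CLAIM (what is proved, stated in full; the proofs are below) =====
def Claim_equal_drop_hints_and_normalize : Prop := ∀ (stmt : String), Dom_drop_hints_and_normalize stmt → Spec_drop_hints_and_normalize stmt (drop_hints_and_normalize stmt)

-- ===== LEMMAS AND PROOFS =====

theorem pvALoop_no_hint : ∀ cs, pvFindHint cs = none → pvALoop cs = cs := by
  intro cs
  induction cs with
  | nil => intro _; rw [pvALoop.eq_def]
  | cons c rest ih =>
    intro h
    simp only [pvFindHint] at h
    split at h
    · simp at h
    · rename_i hp
      rw [pvALoop.eq_def]
      dsimp only
      rw [if_neg hp, ih (by simpa using h)]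

theorem pvALoop_step : ∀ cs k, pvFindHint cs = some k →
    pvALoop cs = cs.take k ++
      (match pvFindClose (cs.drop (k + 3)) with
        | none => []
        | some e => pvALoop (cs.drop (k + 3 + e + 2))) := by
  intro cs
  induction cs with
  | nil => intro k h; simp [pvFindHint] at h
  | cons c rest ih =>
    intro k h
    simp only [pvFindHint] at h
    split at h
    · rename_i hp
      cases h
      rw [pvALoop.eq_def]
      dsimp only
      rw [if_pos hp]
      simp
    · rename_i hp
      rcases Option.map_eq_some_iff.mp h with ⟨j, hj, rfl⟩
      rw [pvALoop.eq_def]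
      dsimp only
      rw [if_neg hp, ih j hj]
      simp only [List.take_succ_cons, List.drop_succ_cons, List.cons_append]
      have h1 : j + 1 + 3 = (j + 3) + 1 := by omega
      rw [h1]
      have h2 : ∀ e : Nat, j + 3 + 1 + e + 1 = j + 3 + e + 2 := by omega
      simp only [h2]

theorem pvALoop_eq_pvBLoop : ∀ cs, pvALoop cs = pvBLoop cs := by
  intro cs
  induction cs using pvBLoop.induct with
  | case1 cs hf =>
    rw [pvBLoop.eq_def, pvALoop_no_hint cs hf]
    split <;> simp_all
  | case2 cs k hf hc =>
    rw [pvALoop_step cs k hf]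
    simp only [hc]
    rw [pvBLoop.eq_def]
    split
    · simp_all
    · rename_i k' hf'
      rw [hf] at hf'; cases hf'
      simp [hc]
  | case3 cs k hf e hc ih =>
    rw [pvALoop_step cs k hf]
    simp only [hc]
    rw [pvBLoop.eq_def]
    split
    · simp_all
    · rename_i k' hf'
      rw [hf] at hf'; cases hf'
      simp [hc, ih]

-- ===== VERDICT (by name: the statement is the Claim_ definition above) =====
theorem drop_hints_and_normalize_spec : Claim_equal_drop_hints_and_normalize := by
  intro stmt _
  unfold Spec_drop_hints_and_normalize drop_hints_and_normalize drop_hints_and_normalize_alt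
  rw [pvALoop_eq_pvBLoop]
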